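-- pv_equiv track=rewrite | github.com/chenxia31/BusSchedule | utils/originalTimetableParsing.py | countListTime
-- ===== SOURCE A (Python) =====
-- def countListTime(mealTimeList):
--     '''
--     统计司机的吃饭时间和对应的数量
--
--     args:
--     mealTimeList:吃饭时间[[i,o],[i,o],...]
--
--     return:
--     mealIntervals:分段的时间
--     mealCount:分段的数量
--     '''
--     inputTime=[d[0] for d in mealTimeList]
--     outputTime=[d[1] for d in mealTimeList]
--     inputTime.sort()
--     outputTime.sort()
--     # 排序之后开始counting
--     mealIntervals=[0]
--     mealCount=[0]
--     while inputTime and outputTime: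
--         if min(inputTime[0],outputTime[0]) ==  inputTime[0]:
--             # 如果现在是增加
--             mealIntervals.append(inputTime.pop(0))
--             mealCount.append(mealCount[-1]+1)
--         else:
--             # 限制是离开
--             mealIntervals.append(outputTime.pop(0))
--             mealCount.append(mealCount[-1]-1)
--     while(outputTime):
--         mealIntervals.append(outputTime.pop(0))
--         mealCount.append(mealCount[-1]-1)
--     return mealIntervals,mealCount
-- ===== SOURCE B (Python) =====
-- def countListTime(mealTimeList):
--     # Sort start/end times once, then merge with index pointers and a running
--     # counter, instead of repeated list.pop(0) and mealCount[-1] reads.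
--     starts = sorted(d[0] for d in mealTimeList)
--     ends = sorted(d[1] for d in mealTimeList)
--     n = len(starts)
--     mealIntervals = [0]
--     mealCount = [0]
--     c = 0
--     i = j = 0
--     while i < n and j < n:
--         if starts[i] <= ends[j]:
--             c += 1
--             mealIntervals.append(starts[i])
--             i += 1
--         else:
--             c -= 1
--             mealIntervals.append(ends[j])
--             j += 1
--         mealCount.append(c)
--     while j < n:
--         c -= 1
--         mealIntervals.append(ends[j])
--         j += 1
--         mealCount.append(c)
--     return mealIntervals, mealCount
-- ===== Notes on version B (the rewrite author's own statement) =====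
-- stated objective: alternative
-- what changed: Replaces the list.pop(0)/min-head merge and mealCount[-1] re-reads with an index-pointer merge over the two sorted lists and a running counter.
import Mathlib
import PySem

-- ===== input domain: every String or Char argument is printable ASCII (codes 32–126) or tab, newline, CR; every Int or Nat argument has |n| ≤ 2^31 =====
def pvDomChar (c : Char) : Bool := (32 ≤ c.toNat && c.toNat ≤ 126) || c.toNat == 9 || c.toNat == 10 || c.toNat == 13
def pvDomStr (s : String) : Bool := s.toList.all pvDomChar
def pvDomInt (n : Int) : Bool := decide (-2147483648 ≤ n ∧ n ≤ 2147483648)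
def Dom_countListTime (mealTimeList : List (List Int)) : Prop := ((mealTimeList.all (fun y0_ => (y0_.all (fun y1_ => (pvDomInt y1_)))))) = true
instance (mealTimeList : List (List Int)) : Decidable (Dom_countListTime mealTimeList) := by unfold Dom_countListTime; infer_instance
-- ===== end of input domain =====

-- B replaces A's pop(0)/min-head merge with an index-pointer merge over the sorted lists
-- and a running counter (objective: alternative; equivalence of return values is proved below).

-- ===== PORT A =====
-- second while loop: drain the remaining outputTime
def pvDrainA : List Int → List Int → List Int → List Int × List Int
  | [], mi, mc => (mi, mc)
  | b :: ot, mi, mc => pvDrainA ot (mi ++ [b]) (mc ++ [PySem.List.pyGetD mc (-1) 0 - 1])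

-- first while loop: while inputTime and outputTime
def pvLoopA : List Int → List Int → List Int → List Int → List Int × List Int
  | a :: it, b :: ot, mi, mc =>
      if min a b = a then
        pvLoopA it (b :: ot) (mi ++ [a]) (mc ++ [PySem.List.pyGetD mc (-1) 0 + 1])
      else
        pvLoopA (a :: it) ot (mi ++ [b]) (mc ++ [PySem.List.pyGetD mc (-1) 0 - 1])
  | _, ot, mi, mc => pvDrainA ot mi mc
termination_by it ot _ _ => it.length + ot.length

-- d[0] / d[1] are total here via a default; Pre_ keeps exactly the rows where Python's d[0], d[1] do not raise
def countListTime (mealTimeList : List (List Int)) : List Int × List Int :=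
  let inputTime := PySem.List.sorted (mealTimeList.map fun d => PySem.List.pyGetD d 0 0) (fun x => x) false
  let outputTime := PySem.List.sorted (mealTimeList.map fun d => PySem.List.pyGetD d 1 0) (fun x => x) false
  pvLoopA inputTime outputTime [0] [0]

-- ===== PORT B =====
-- second while in Source B: while j < n
def pvDrainB (ends : List Int) (n j : Nat) (c : Int) (mi mc : List Int) : List Int × List Int :=
  if j < n then
    pvDrainB ends n (j + 1) (c - 1) (mi ++ [ends.getD j 0]) (mc ++ [c - 1])
  else (mi, mc)
termination_by n - j

-- first while in Source B: while i < n and j < n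
def pvMergeB (starts ends : List Int) (n i j : Nat) (c : Int) (mi mc : List Int) : List Int × List Int :=
  if i < n ∧ j < n then
    if starts.getD i 0 ≤ ends.getD j 0 then
      pvMergeB starts ends n (i + 1) j (c + 1) (mi ++ [starts.getD i 0]) (mc ++ [c + 1])
    else
      pvMergeB starts ends n i (j + 1) (c - 1) (mi ++ [ends.getD j 0]) (mc ++ [c - 1])
  else pvDrainB ends n j c mi mc
termination_by (n - i) + (n - j)
decreasing_by all_goals omega

def countListTime_alt (mealTimeList : List (List Int)) : List Int × List Int :=
  let starts := PySem.List.sorted (mealTimeList.map fun d => PySem.List.pyGetD d 0 0) (fun x => x) false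
  let ends := PySem.List.sorted (mealTimeList.map fun d => PySem.List.pyGetD d 1 0) (fun x => x) false
  pvMergeB starts ends starts.length 0 0 0 [0] [0]

-- ===== PRECONDITION & SPEC =====
-- Pre_ excludes exactly the rows on which A's d[0] or d[1] raises IndexError (a row shorter than 2)
def Pre_countListTime (mealTimeList : List (List Int)) : Prop :=
  ∀ d ∈ mealTimeList, 2 ≤ d.length
instance (mealTimeList : List (List Int)) : Decidable (Pre_countListTime mealTimeList) := by
  unfold Pre_countListTime; infer_instance

def pvWitness_countListTime : List (List Int) := [[1, 3], [2, 4], [5, 6]]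

def Spec_countListTime (mealTimeList : List (List Int)) (out : List Int × List Int) : Prop := out = countListTime_alt mealTimeList
instance (mealTimeList : List (List Int)) (out : List Int × List Int) : Decidable (Spec_countListTime mealTimeList out) := by unfold Spec_countListTime; infer_instance

-- ===== CLAIM (what is proved, stated in full; the proofs are below) =====
def Claim_equal_countListTime : Prop := ∀ (mealTimeList : List (List Int)), Dom_countListTime mealTimeList → Pre_countListTime mealTimeList → Spec_countListTime mealTimeList (countListTime mealTimeList)

-- ===== LEMMAS AND PROOFS =====

lemma pvDrain_eq (ends : List Int) : ∀ (j : Nat) (c : Int) (mi mc : List Int),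
    c = PySem.List.pyGetD mc (-1) 0 →
    pvDrainB ends ends.length j c mi mc = pvDrainA (ends.drop j) mi mc := by
  intro j
  induction hj : ends.length - j using Nat.strong_induction_on generalizing j with
  | _ k ih =>
    intro c mi mc hc
    by_cases h : j < ends.length
    · rw [pvDrainB, if_pos h, List.drop_eq_getElem_cons h, pvDrainA,
        List.getD_eq_getElem ends 0 h, ← hc]
      exact ih (ends.length - (j + 1)) (by omega) (j + 1) rfl (c - 1) _ _
        (PySem.List.pyGetD_neg_one_append_singleton mc (c - 1) 0).symm
    · rw [pvDrainB, if_neg h, List.drop_of_length_le (by omega), pvDrainA]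

lemma pvMerge_eq (starts ends : List Int) (hn : ends.length = starts.length) :
    ∀ (i j : Nat) (c : Int) (mi mc : List Int),
    c = PySem.List.pyGetD mc (-1) 0 →
    pvMergeB starts ends starts.length i j c mi mc
      = pvLoopA (starts.drop i) (ends.drop j) mi mc := by
  intro i j
  induction hm : (starts.length - i) + (starts.length - j) using Nat.strong_induction_on
    generalizing i j with
  | _ k ih =>
    intro c mi mc hc
    by_cases h : i < starts.length ∧ j < starts.length
    · have hj : j < ends.length := by omega
      rw [pvMergeB, if_pos h, List.drop_eq_getElem_cons h.1, List.drop_eq_getElem_cons hj,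
        pvLoopA, List.getD_eq_getElem starts 0 h.1, List.getD_eq_getElem ends 0 hj, ← hc]
      have hmin : (min starts[i] ends[j] = starts[i]) ↔ starts[i] ≤ ends[j] :=
        min_eq_left_iff
      by_cases hle : starts[i] ≤ ends[j]
      · rw [if_pos hle, if_pos (hmin.mpr hle), ← List.drop_eq_getElem_cons hj]
        exact ih _ (by omega) (i + 1) j rfl (c + 1) _ _
          (PySem.List.pyGetD_neg_one_append_singleton mc (c + 1) 0).symm
      · rw [if_neg hle, if_neg (fun hx => hle (hmin.mp hx)),
          ← List.drop_eq_getElem_cons h.1]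
        exact ih _ (by omega) i (j + 1) rfl (c - 1) _ _
          (PySem.List.pyGetD_neg_one_append_singleton mc (c - 1) 0).symm
    · rw [pvMergeB, if_neg h]
      by_cases hi : i < starts.length
      · -- then j ≥ n: outputTime exhausted, both sides stop with (mi, mc)
        have hj : ends.length ≤ j := by omega
        rw [List.drop_of_length_le hj, List.drop_eq_getElem_cons hi, pvLoopA,
          pvDrainB, if_neg (by omega), pvDrainA]
        intro _ _ _ _ _ hbad; cases hbad
      · -- i ≥ n: inputTime exhausted, both sides drain outputTime
        rw [List.drop_of_length_le (by omega), pvLoopA, ← hn]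
        · exact pvDrain_eq ends j c mi mc hc
        · intro _ _ _ _ hbad; cases hbad

-- ===== VERDICT (by name: the statement is the Claim_ definition above) =====
theorem countListTime_spec : Claim_equal_countListTime := by
  intro mealTimeList _ _
  unfold Spec_countListTime countListTime countListTime_alt
  rw [pvMerge_eq _ _ (by simp [PySem.List.length_sorted]) 0 0 0 [0] [0] rfl]
  rfl
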